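-- pv_equiv track=rewrite | github.com/Shawvin/Leetcode | removeExtraSpace.py | removeExtraSpace
-- ===== SOURCE A (Python) =====
-- def removeExtraSpace(s):
--     s=list(s)
--     r=0
--     l=0
--     while r<len(s):
--         if s[r]!=' ':
--             if l!=0:
--                 s[l]=' '
--                 l+=1
--             while r<len(s) and s[r]!=' ':
--                 s[l]=s[r]
--                 l+=1
--                 r+=1
--         else:
--             r+=1
--     return ''.join(s[:l])
-- ===== SOURCE B (Python) =====
-- def removeExtraSpace(s):
--     return ' '.join(w for w in s.split(' ') if w)
-- ===== Notes on version B (the rewrite author's own statement) =====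
-- stated objective: idiomatic
-- what changed: Replaces the in-place two-pointer scan over a char list with a split-on-space / filter-empty / join-with-space pipeline.
import Mathlib
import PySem

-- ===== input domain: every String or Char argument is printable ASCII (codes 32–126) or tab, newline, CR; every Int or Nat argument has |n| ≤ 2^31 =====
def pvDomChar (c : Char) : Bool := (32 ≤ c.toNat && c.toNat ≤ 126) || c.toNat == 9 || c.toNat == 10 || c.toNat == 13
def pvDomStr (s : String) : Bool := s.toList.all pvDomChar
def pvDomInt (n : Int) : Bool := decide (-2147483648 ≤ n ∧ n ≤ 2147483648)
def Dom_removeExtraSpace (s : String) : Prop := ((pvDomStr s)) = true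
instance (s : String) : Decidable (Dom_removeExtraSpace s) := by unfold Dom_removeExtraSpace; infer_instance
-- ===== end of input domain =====

-- B replaces A's in-place two-pointer scan with an idiomatic split-on-space / drop-empty / join pipeline; return values proved equal (A's list mutation is local, not observable).

-- ===== PORT A =====
-- inner `while r<len(s) and s[r]!=' '` loop: copies the current word from r down to l
-- in the buffer (fuel is only a structural totality guard; buf.length is enough)
def pvInnerA : Nat → List Char → Nat → Nat → List Char × Nat × Nat
  | 0, buf, l, r => (buf, l, r)
  | fuel + 1, buf, l, r =>
    if r < buf.length ∧ buf.getD r ' ' ≠ ' ' then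
      pvInnerA fuel (buf.set l (buf.getD r ' ')) (l + 1) (r + 1)
    else (buf, l, r)

-- outer `while r<len(s)` loop (fuel 2*len+1 bounds its iteration count)
def pvOuterA : Nat → List Char → Nat → Nat → List Char × Nat
  | 0, buf, l, _ => (buf, l)
  | fuel + 1, buf, l, r =>
    if r < buf.length then
      if buf.getD r ' ' ≠ ' ' then
        if l ≠ 0 then
          let q := pvInnerA buf.length (buf.set l ' ') (l + 1) r
          pvOuterA fuel q.1 q.2.1 q.2.2
        else
          let q := pvInnerA buf.length buf l r
          pvOuterA fuel q.1 q.2.1 q.2.2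
      else pvOuterA fuel buf l (r + 1)
    else (buf, l)

def removeExtraSpace (s : String) : String :=
  let q := pvOuterA (2 * s.toList.length + 1) s.toList 0 0
  String.ofList (q.1.take q.2)

-- ===== PORT B =====
def removeExtraSpace_alt (s : String) : String :=
  PySem.Str.join " " (((PySem.Str.split? s " ").getD []).filter (· ≠ ""))

-- ===== PRECONDITION & SPEC =====
def Spec_removeExtraSpace (s : String) (out : String) : Prop := out = removeExtraSpace_alt s
instance (s : String) (out : String) : Decidable (Spec_removeExtraSpace s out) := by unfold Spec_removeExtraSpace; infer_instance

-- ===== CLAIM (what is proved, stated in full; the proofs are below) =====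
def Claim_equal_removeExtraSpace : Prop := ∀ (s : String), Dom_removeExtraSpace s → Spec_removeExtraSpace s (removeExtraSpace s)

-- ===== LEMMAS AND PROOFS =====

-- the common normal form: trim + collapse, as a three-state machine over the char list
mutual
def pvNormWord : List Char → List Char
  | [] => []
  | c :: t => if c = ' ' then pvNormSep t else c :: pvNormWord t
def pvNormSep : List Char → List Char
  | [] => []
  | c :: t => if c = ' ' then pvNormSep t else ' ' :: c :: pvNormWord t
end

def pvNorm : List Char → List Char
  | [] => []
  | c :: t => if c = ' ' then pvNorm t else c :: pvNormWord t

theorem take_set_succ (buf : List Char) (l : Nat) (c : Char) (h : l < buf.length) :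
    (buf.set l c).take (l + 1) = buf.take l ++ [c] := by
  rw [List.take_set, List.take_add_one, List.getElem?_eq_getElem h, List.set_append]
  simp [Nat.min_eq_left h.le]

theorem drop_takeWhile (l : List Char) (p : Char → Bool) :
    l.drop (l.takeWhile p).length = l.dropWhile p := by
  induction l with
  | nil => simp
  | cons c t ih =>
    by_cases h : p c <;> simp [List.takeWhile_cons, List.dropWhile_cons, h, ih]

theorem pvNormWord_eq (x : List Char) :
    pvNormWord x = x.takeWhile (· ≠ ' ') ++ pvNormSep (x.dropWhile (· ≠ ' ')) := by
  induction x with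
  | nil => simp [pvNormWord, pvNormSep]
  | cons c t ih =>
    by_cases h : c = ' ' <;>
      simp [pvNormWord, pvNormSep, List.takeWhile_cons, List.dropWhile_cons, h, ih]

theorem pvInnerA_len (fuel : Nat) : ∀ (buf : List Char) (l r : Nat),
    (pvInnerA fuel buf l r).1.length = buf.length := by
  induction fuel with
  | zero => intro buf l r; rfl
  | succ fuel ih =>
    intro buf l r
    rw [pvInnerA]
    split
    · rw [ih]; simp
    · rfl

theorem pvInnerA_spec (fuel : Nat) : ∀ (buf : List Char) (l r : Nat),
    buf.length - r ≤ fuel → l ≤ r →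
    (pvInnerA fuel buf l r).2.2 = r + ((buf.drop r).takeWhile (· ≠ ' ')).length ∧
    (pvInnerA fuel buf l r).2.1 = l + ((buf.drop r).takeWhile (· ≠ ' ')).length ∧
    (pvInnerA fuel buf l r).1.take ((pvInnerA fuel buf l r).2.1) =
      buf.take l ++ (buf.drop r).takeWhile (· ≠ ' ') ∧
    (pvInnerA fuel buf l r).1.drop ((pvInnerA fuel buf l r).2.2) =
      buf.drop (r + ((buf.drop r).takeWhile (· ≠ ' ')).length) := by
  induction fuel with
  | zero =>
    intro buf l r hk hlr
    have hw : (buf.drop r).takeWhile (· ≠ ' ') = [] := by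
      rw [List.drop_eq_nil_of_le (by omega)]; rfl
    rw [hw]
    simp [pvInnerA]
  | succ fuel ih =>
    intro buf l r hk hlr
    by_cases hc : r < buf.length ∧ buf.getD r ' ' ≠ ' '
    · rw [pvInnerA, if_pos hc]
      obtain ⟨i1, i2, i3, i4⟩ := ih (buf.set l (buf.getD r ' ')) (l + 1) (r + 1)
        (by simp only [List.length_set]; omega) (by omega)
      have hdrop : buf.drop r = buf.getD r ' ' :: buf.drop (r + 1) := by
        rw [List.getD_eq_getElem _ _ hc.1]; exact List.drop_eq_getElem_cons hc.1
      have hw : (buf.drop r).takeWhile (· ≠ ' ') =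
          buf.getD r ' ' :: (buf.drop (r + 1)).takeWhile (· ≠ ' ') := by
        rw [hdrop, List.takeWhile_cons, if_pos (by simpa using hc.2)]
      have hds : (buf.set l (buf.getD r ' ')).drop (r + 1) = buf.drop (r + 1) :=
        List.drop_set_of_lt (by omega)
      rw [hds] at i1 i2 i3 i4
      rw [hw]
      refine ⟨by rw [i1]; simp; omega, by rw [i2]; simp; omega, ?_, ?_⟩
      · rw [i3, take_set_succ buf l _ (by omega)]
        simp
      · rw [i4, List.drop_set_of_lt (by omega)]
        congr 1
        simp
        omega
    · rw [pvInnerA, if_neg hc]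
      have hw : (buf.drop r).takeWhile (· ≠ ' ') = [] := by
        by_cases hrl : r < buf.length
        · have hsp : buf.getD r ' ' = ' ' := by
            by_contra hne; exact hc ⟨hrl, hne⟩
          rw [List.getD_eq_getElem _ _ hrl] at hsp
          rw [List.drop_eq_getElem_cons hrl, List.takeWhile_cons, if_neg (by simp [hsp])]
        · rw [List.drop_eq_nil_of_le (by omega)]; rfl
      rw [hw]
      simp

theorem dropWhile_head_sp (x : List Char) (c : Char) (t : List Char)
    (h : x.dropWhile (· ≠ ' ') = c :: t) : c = ' ' := by
  have hne : x.dropWhile (· ≠ ' ') ≠ [] := by rw [h]; simp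
  have h2 := List.head_dropWhile_not (· ≠ ' ') hne
  have h4 : (x.dropWhile (· ≠ ' ')).head? = some c := by rw [h]; rfl
  rw [List.head?_eq_some_head hne, Option.some_inj] at h4
  rw [h4] at h2
  simpa using h2

theorem getD_eq_of_drop_eq (a b : List Char) (n m : Nat)
    (h : a.drop n = b.drop m) (hn : n < a.length) (hm : m < b.length) :
    a.getD n ' ' = b.getD m ' ' := by
  have h5 := congrArg List.head? h
  rw [List.drop_eq_getElem_cons hn, List.drop_eq_getElem_cons hm] at h5
  simp only [List.head?_cons, Option.some_inj] at h5
  rw [List.getD_eq_getElem _ _ hn, List.getD_eq_getElem _ _ hm, h5]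

theorem pvNorm_split (c : Char) (t : List Char) (hc : c ≠ ' ') :
    pvNorm (c :: t) =
      (c :: t).takeWhile (· ≠ ' ') ++ pvNormSep ((c :: t).dropWhile (· ≠ ' ')) := by
  simp [pvNorm, hc, List.takeWhile_cons, List.dropWhile_cons, pvNormWord_eq]

theorem pvNormSep_split (c : Char) (t : List Char) (hc : c ≠ ' ') :
    pvNormSep (c :: t) =
      ' ' :: ((c :: t).takeWhile (· ≠ ' ') ++ pvNormSep ((c :: t).dropWhile (· ≠ ' '))) := by
  simp [pvNormSep, hc, List.takeWhile_cons, List.dropWhile_cons, pvNormWord_eq]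

theorem pvOuterA_spec (fuel : Nat) : ∀ (buf : List Char) (l r : Nat),
    2 * (buf.length - r) + 1 ≤ fuel → l ≤ r →
    (0 < l → r < buf.length → l < r ∨ buf.getD r ' ' = ' ') →
    (pvOuterA fuel buf l r).1.take (pvOuterA fuel buf l r).2 =
      buf.take l ++ (if l = 0 then pvNorm (buf.drop r) else pvNormSep (buf.drop r)) := by
  induction fuel with
  | zero => intro buf l r hk; omega
  | succ fuel ih =>
    intro buf l r hk hlr hinv
    by_cases hr : r < buf.length
    · have hdc : buf.drop r = buf.getD r ' ' :: buf.drop (r + 1) := by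
        rw [List.getD_eq_getElem _ _ hr]; exact List.drop_eq_getElem_cons hr
      by_cases hc : buf.getD r ' ' ≠ ' '
      · -- a word starts at r
        have hwcons : (buf.drop r).takeWhile (· ≠ ' ') =
            buf.getD r ' ' :: (buf.drop (r + 1)).takeWhile (· ≠ ' ') := by
          rw [hdc, List.takeWhile_cons, if_pos (by simpa using hc)]
        set w := (buf.drop r).takeWhile (· ≠ ' ') with hwdef
        have hwlen : 0 < w.length := by rw [hwcons]; simp
        have hdropw : buf.drop (r + w.length) = (buf.drop r).dropWhile (· ≠ ' ') := by
          rw [← drop_takeWhile (buf.drop r) (· ≠ ' '), List.drop_drop, Nat.add_comm]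
        have hstopchar : ∀ _ : r + w.length < buf.length,
            buf.getD (r + w.length) ' ' = ' ' := by
          intro h2
          have h3 : buf.drop (r + w.length) = buf[r + w.length] :: buf.drop (r + w.length + 1) :=
            List.drop_eq_getElem_cons h2
          rw [hdropw] at h3
          rw [List.getD_eq_getElem _ _ h2]
          exact dropWhile_head_sp _ _ _ h3
        by_cases hl0 : l = 0
        · subst hl0
          rw [pvOuterA, if_pos hr, if_pos hc, if_neg (by simp)]
          obtain ⟨i1, i2, i3, i4⟩ :=
            pvInnerA_spec buf.length buf 0 r (by omega) (Nat.zero_le r)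
          have hqlen := pvInnerA_len buf.length buf 0 r
          rw [← hwdef] at i1 i2 i3 i4
          rw [ih _ _ _ (by omega) (by omega) ?inv]
          case inv =>
            intro _ hlt2
            right
            rw [i1] at hlt2 ⊢
            rw [hqlen] at hlt2
            exact getD_eq_of_drop_eq _ _ _ _ (i1 ▸ i4) (by omega) (by omega) |>.trans
              (hstopchar hlt2)
          rw [i3, i4, i2]
          rw [if_neg (by omega), if_pos rfl]
          simp only [List.take_zero, List.nil_append]
          rw [hdc, pvNorm_split _ _ hc, ← hdc, ← hwdef, hdropw]
        · -- l ≠ 0 : write a separating space, then copy the word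
          have hlt : l < r := by
            rcases hinv (by omega) hr with h | h
            · exact h
            · exact absurd h hc
          rw [pvOuterA, if_pos hr, if_pos hc, if_pos hl0]
          have hb2drop : (buf.set l ' ').drop r = buf.drop r := List.drop_set_of_lt hlt
          obtain ⟨i1, i2, i3, i4⟩ :=
            pvInnerA_spec buf.length (buf.set l ' ') (l + 1) r
              (by simp only [List.length_set]; omega) (by omega)
          have hqlen := pvInnerA_len buf.length (buf.set l ' ') (l + 1) r
          rw [hb2drop, ← hwdef] at i1 i2 i3 i4
          rw [List.length_set] at hqlen
          rw [ih _ _ _ (by omega) (by omega) ?inv]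
          case inv =>
            intro _ hlt2
            right
            rw [i1] at hlt2 ⊢
            rw [hqlen] at hlt2
            have h6 : (pvInnerA buf.length (buf.set l ' ') (l + 1) r).1.drop
                ((pvInnerA buf.length (buf.set l ' ') (l + 1) r).2.2) =
                buf.drop (r + w.length) := by
              rw [i4, List.drop_set_of_lt (by omega)]
            exact getD_eq_of_drop_eq _ _ _ _ (i1 ▸ h6) (by omega) (by omega) |>.trans
              (hstopchar hlt2)
          rw [i3, i4, i2]
          rw [take_set_succ buf l ' ' (by omega)]
          rw [if_neg (by omega), if_neg hl0]
          rw [List.drop_set_of_lt (show l < r + w.length by omega)]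
          rw [hdc, pvNormSep_split _ _ hc, ← hdc, ← hwdef, hdropw]
          simp
      · -- a space at r: skip it
        rw [not_not] at hc
        rw [pvOuterA, if_pos hr, if_neg (by simpa using hc)]
        rw [ih _ _ _ (by omega) (by omega) (fun _ _ => Or.inl (by omega))]
        rw [hdc, hc]
        split <;> simp [pvNorm, pvNormSep]
    · rw [pvOuterA, if_neg hr]
      rw [List.drop_eq_nil_of_le (by omega)]
      split <;> simp [pvNorm, pvNormSep]

-- ===== B-side reduction =====

-- Chars.splitOn with single-separator [' '] equals this simple splitter
def pvSp : List Char → List (List Char)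
  | [] => [[]]
  | c :: t => if c = ' ' then [] :: pvSp t else (pvSp t).modifyHead (c :: ·)

theorem pvSp_ne_nil (t : List Char) : pvSp t ≠ [] := by
  induction t with
  | nil => simp [pvSp]
  | cons c t ih =>
    by_cases hc : c = ' ' <;> simp [pvSp, hc]
    intro h
    exact ih (by simpa using congrArg List.length h)

theorem pvGo_sp (fuel : Nat) : ∀ (l cur : List Char) (acc : List (List Char)),
    l.length < fuel →
    PySem.Chars.splitOn.go [' '] fuel l cur acc =
      acc.reverse ++ (pvSp l).modifyHead (cur.reverse ++ ·) := by
  induction fuel with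
  | zero => intro l cur acc h; omega
  | succ fuel ih =>
    intro l cur acc h
    cases l with
    | nil =>
      rw [PySem.Chars.splitOn.go] <;> simp [pvSp]
    | cons c rest =>
      rw [PySem.Chars.splitOn.go]
      by_cases hc : c = ' '
      · subst hc
        rw [if_pos (by simp [List.isPrefixOf])]
        have hdrop : List.drop [' '].length (' ' :: rest) = rest := rfl
        rw [hdrop, ih rest [] (cur.reverse :: acc) (by simpa using h)]
        simp only [pvSp, if_pos rfl, List.reverse_cons, List.reverse_nil,
          List.modifyHead_cons, List.nil_append, List.append_assoc, List.append_nil,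
          List.singleton_append]
        cases pvSp rest <;> simp
      · rw [if_neg (by simp [List.isPrefixOf]; exact fun h' => hc h'.symm)]
        rw [ih rest (c :: cur) acc (by simpa using h)]
        simp only [pvSp, if_neg hc]
        rw [List.modifyHead_modifyHead]
        have hfe : (fun x => (c :: cur).reverse ++ x) =
            ((fun x => cur.reverse ++ x) ∘ fun x => c :: x) := by
          funext x; simp
        rw [hfe]

theorem splitOn_eq_sp (cs : List Char) :
    PySem.Chars.splitOn cs [' '] = pvSp cs := by
  rw [PySem.Chars.splitOn, pvGo_sp (cs.length + 1) cs [] [] (by omega)]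
  simp only [List.reverse_nil, List.nil_append]
  cases pvSp cs <;> simp

-- join with one leading space per kept token
theorem join_flat (x : List Char) (ts : List (List Char)) :
    PySem.Chars.join [' '] (x :: ts) = x ++ (ts.map (' ' :: ·)).flatten := by
  induction ts generalizing x with
  | nil => simp [PySem.Chars.join_singleton]
  | cons y r ih =>
    rw [PySem.Chars.join_cons_cons, ih y]
    simp

theorem sep_word_flat (t : List Char) :
    pvNormSep t = (((pvSp t).filter (· ≠ [])).map (' ' :: ·)).flatten ∧
    ∀ h tl, pvSp t = h :: tl →
      pvNormWord t = h ++ ((tl.filter (· ≠ [])).map (' ' :: ·)).flatten := by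
  induction t with
  | nil =>
    refine ⟨by simp [pvNormSep, pvSp], ?_⟩
    intro h tl e
    simp only [pvSp] at e
    cases e
    simp [pvNormWord]
  | cons c t ih =>
    by_cases hc : c = ' '
    · subst hc
      refine ⟨?_, ?_⟩
      · simp only [pvNormSep, pvSp, if_pos rfl, List.filter_cons]
        simpa using ih.1
      · intro h tl e
        simp only [pvSp, if_pos rfl] at e
        cases e
        simp only [pvNormWord, if_pos rfl, List.nil_append]
        exact ih.1
    · obtain ⟨h', tl', e'⟩ : ∃ h' tl', pvSp t = h' :: tl' := by
        cases e : pvSp t with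
        | nil => exact absurd e (pvSp_ne_nil t)
        | cons a b => exact ⟨a, b, rfl⟩
      have hmod : pvSp (c :: t) = (c :: h') :: tl' := by
        simp [pvSp, hc, e']
      refine ⟨?_, ?_⟩
      · rw [pvNormSep, if_neg hc, hmod]
        rw [List.filter_cons, if_pos (by simp)]
        simp only [List.map_cons, List.flatten_cons]
        rw [ih.2 h' tl' e']
        simp
      · intro h tl e
        rw [hmod] at e
        cases e
        rw [pvNormWord, if_neg hc, ih.2 h' tl' e']
        simp

theorem join_eq_norm (cs : List Char) :
    PySem.Chars.join [' '] ((pvSp cs).filter (· ≠ [])) = pvNorm cs := by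
  induction cs with
  | nil => simp [pvSp, pvNorm, PySem.Chars.join_nil]
  | cons c t ih =>
    by_cases hc : c = ' '
    · subst hc
      simp only [pvSp, if_pos rfl, List.filter_cons]
      rw [pvNorm, if_pos rfl]
      simpa using ih
    · obtain ⟨h', tl', e'⟩ : ∃ h' tl', pvSp t = h' :: tl' := by
        cases e : pvSp t with
        | nil => exact absurd e (pvSp_ne_nil t)
        | cons a b => exact ⟨a, b, rfl⟩
      have hmod : pvSp (c :: t) = (c :: h') :: tl' := by
        simp [pvSp, hc, e']
      rw [hmod, List.filter_cons, if_pos (by simp)]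
      rw [join_flat, pvNorm, if_neg hc]
      rw [(sep_word_flat t).2 h' tl' e']
      simp

theorem ofList_ne_empty_iff (x : List Char) : (String.ofList x ≠ "") ↔ x ≠ [] := by
  constructor
  · intro h hx; subst hx; exact h rfl
  · intro h he; exact h (by simpa using congrArg String.toList he)

theorem alt_eq_norm (s : String) :
    removeExtraSpace_alt s = String.ofList (pvNorm s.toList) := by
  rw [removeExtraSpace_alt, PySem.Str.split?, PySem.Chars.split?]
  rw [if_neg (by simp)]
  simp only [Option.map_some, Option.getD_some]
  rw [PySem.Str.join]
  congr 1
  rw [List.filter_map, List.map_map]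
  rw [show (String.toList ∘ String.ofList) = (id : List Char → List Char) from
    funext (fun x => String.toList_ofList)]
  rw [List.map_id]
  have hpred : ((fun (s : String) => decide (s ≠ "")) ∘ String.ofList) =
      fun (x : List Char) => decide (x ≠ []) := by
    funext x
    show decide (String.ofList x ≠ "") = decide (x ≠ [])
    rw [decide_eq_decide]
    exact ofList_ne_empty_iff x
  rw [hpred]
  show PySem.Chars.join [' '] ((PySem.Chars.splitOn s.toList [' ']).filter (· ≠ [])) = _
  rw [splitOn_eq_sp, join_eq_norm]

theorem a_eq_norm (s : String) :
    removeExtraSpace s = String.ofList (pvNorm s.toList) := by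
  have h := pvOuterA_spec (2 * s.toList.length + 1) s.toList 0 0 (by omega) le_rfl (by omega)
  simp only [List.take_zero, List.nil_append, List.drop_zero, if_true] at h
  show String.ofList ((pvOuterA (2 * s.toList.length + 1) s.toList 0 0).1.take
    (pvOuterA (2 * s.toList.length + 1) s.toList 0 0).2) = _
  rw [h]

-- ===== VERDICT (by name: the statement is the Claim_ definition above) =====
theorem removeExtraSpace_spec : Claim_equal_removeExtraSpace := by
  intro s _
  unfold Spec_removeExtraSpace
  rw [a_eq_norm, alt_eq_norm]
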